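-- pv_equiv track=rewrite | github.com/ante-neh/A2SVCompetetiveProgramming | 0914-x-of-a-kind-in-a-deck-of-cards/0914-x-of-a-kind-in-a-deck-of-cards.py | hasGroupsSizeX
-- ===== SOURCE A (Python) =====
-- from typing import List
--
-- def hasGroupsSizeX(deck: List[int]) -> bool:
--     def gcd(a, b):
--         if b == 0:
--             return a
--
--         return gcd(b, a % b)
--
--     deckCount = {}
--     for d in deck:
--         deckCount[d] = 1 + deckCount.get(d, 0)
--
--     value = []
--     for item in deckCount.items():
--         value.append(item[1])
--     cur = value[0]
--     for i in range(1, len(value)):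
--         cur = gcd(max(cur, value[i]), min(cur, value[i]))
--
--     return cur >= 2
-- ===== SOURCE B (Python) =====
-- def hasGroupsSizeX(deck):
--     counts = {}
--     for d in deck:
--         counts[d] = counts.get(d, 0) + 1
--     vals = list(counts.values())
--     m = min(vals)  # raises ValueError on an empty deck
--     for g in range(2, m + 1):
--         if all(v % g == 0 for v in vals):
--             return True
--     return False
-- ===== Notes on version B (the rewrite author's own statement) =====
-- stated objective: alternative
-- what changed: Replaces A's recursive-gcd fold over the frequency values by a direct search over candidate group sizes g in range(2, min(counts)+1), returning True at the first g dividing every count.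
import Mathlib
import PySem

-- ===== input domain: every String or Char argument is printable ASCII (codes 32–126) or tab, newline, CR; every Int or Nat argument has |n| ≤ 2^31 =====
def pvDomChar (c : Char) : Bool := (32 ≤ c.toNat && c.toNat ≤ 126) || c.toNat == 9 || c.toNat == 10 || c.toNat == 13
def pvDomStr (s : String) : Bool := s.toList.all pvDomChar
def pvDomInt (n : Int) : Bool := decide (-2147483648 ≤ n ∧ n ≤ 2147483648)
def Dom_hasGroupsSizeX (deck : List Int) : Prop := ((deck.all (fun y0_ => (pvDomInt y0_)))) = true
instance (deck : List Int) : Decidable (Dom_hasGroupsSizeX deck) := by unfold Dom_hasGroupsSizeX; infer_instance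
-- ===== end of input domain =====

-- B replaces A's recursive-gcd fold over the frequency values by a direct search over
-- candidate group sizes 2..min(counts); alternative algorithm, equal result.


-- ===== PORT A =====
-- A's inner helper `gcd` (Python's `%`, recursion as written); terminates since |a % b| < |b| for b ≠ 0
def pyGcdA (a b : Int) : Int :=
  if h : b = 0 then a
  else pyGcdA b (PySem.Int.mod a b)
termination_by b.natAbs
decreasing_by
  rcases lt_trichotomy b 0 with hb | hb | hb
  · have h1 := PySem.Int.mod_neg_bounds a hb
    omega
  · exact absurd hb h
  · have h1 := PySem.Int.mod_nonneg a hb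
    have h2 := PySem.Int.mod_lt a hb
    omega

def hasGroupsSizeX (deck : List Int) : Bool :=
  let deckCount := deck.foldl (fun d x => d.insert x (1 + d.getD x 0)) (PySem.Dict.empty)
  let value := deckCount.items.foldl (fun acc item => acc ++ [item.2]) []
  let cur0 := PySem.List.pyGetD value 0 0
  let cur := (PySem.List.pyRange 1 value.length 1).foldl
      (fun cur i => pyGcdA (max cur (PySem.List.pyGetD value i 0)) (min cur (PySem.List.pyGetD value i 0))) cur0
  decide (2 ≤ cur)

-- ===== PORT B =====
def hasGroupsSizeX_alt (deck : List Int) : Bool :=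
  let counts := deck.foldl (fun d x => d.insert x (d.getD x 0 + 1)) (PySem.Dict.empty)
  let vals := counts.values
  match PySem.List.min? vals (fun v => v) with
  | none => false   -- unreachable under Pre_: Python raises ValueError here
  | some m => (PySem.List.pyRange 2 (m + 1) 1).any
      (fun g => vals.all (fun v => PySem.Int.mod v g == 0))

-- ===== PRECONDITION & SPEC =====
-- Pre_ excludes only the empty deck, on which A raises IndexError (and B raises ValueError).
def Pre_hasGroupsSizeX (deck : List Int) : Prop := deck ≠ []
instance (deck : List Int) : Decidable (Pre_hasGroupsSizeX deck) := by unfold Pre_hasGroupsSizeX; infer_instance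
def pvWitness_hasGroupsSizeX : List Int := [1, 1, 2, 2]

def Spec_hasGroupsSizeX (deck : List Int) (out : Bool) : Prop := out = hasGroupsSizeX_alt deck
instance (deck : List Int) (out : Bool) : Decidable (Spec_hasGroupsSizeX deck out) := by unfold Spec_hasGroupsSizeX; infer_instance

-- ===== CLAIM (what is proved, stated in full; the proofs are below) =====
def Claim_equal_hasGroupsSizeX : Prop := ∀ (deck : List Int), Dom_hasGroupsSizeX deck → Pre_hasGroupsSizeX deck → Spec_hasGroupsSizeX deck (hasGroupsSizeX deck)

-- ===== LEMMAS AND PROOFS =====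

-- A's gcd on nonnegative arguments is Nat.gcd
theorem pyGcdA_natCast (n : Nat) : ∀ (m : Nat), pyGcdA (m : Int) (n : Int) = (Nat.gcd m n : Int) := by
  induction n using Nat.strong_induction_on with
  | _ n ih =>
    intro m
    by_cases hn : n = 0
    · subst hn; rw [pyGcdA]; simp
    · rw [pyGcdA]
      have hne : (n : Int) ≠ 0 := by exact_mod_cast hn
      rw [dif_neg hne, PySem.Int.mod_natCast]
      rw [ih (m % n) (Nat.mod_lt _ (Nat.pos_of_ne_zero hn))]
      rw [Nat.gcd_comm n (m % n), ← Nat.gcd_rec, Nat.gcd_comm]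

-- the gcd-of-max-and-min step on casts
theorem pyGcdA_step (c w : Nat) :
    pyGcdA (max (c : Int) (w : Int)) (min (c : Int) (w : Int)) = (Nat.gcd c w : Int) := by
  rcases le_total c w with h | h
  · have hc : ((c : Int) ≤ (w : Int)) := by exact_mod_cast h
    rw [max_eq_right hc, min_eq_left hc, pyGcdA_natCast, Nat.gcd_comm]
  · have hc : ((w : Int) ≤ (c : Int)) := by exact_mod_cast h
    rw [max_eq_left hc, min_eq_right hc, pyGcdA_natCast]

-- A's fold over the remaining counts computes the Nat.gcd fold
theorem fold_gcd_eq (l : List Int) : ∀ (c : Nat), (∀ v ∈ l, 0 ≤ v) →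
    l.foldl (fun cur v => pyGcdA (max cur v) (min cur v)) (c : Int)
      = ((l.foldl (fun n v => Nat.gcd n v.toNat) c : Nat) : Int) := by
  induction l with
  | nil => intro c _; rfl
  | cons v l ih =>
    intro c hl
    have hv : 0 ≤ v := hl v (by simp)
    have hv' : v = ((v.toNat : Nat) : Int) := (Int.toNat_of_nonneg hv).symm
    simp only [List.foldl_cons]
    rw [hv', pyGcdA_step c v.toNat]
    simp only [Int.toNat_natCast]
    exact ih _ (fun w hw => hl w (by simp [hw]))

theorem foldl_gcd_dvd (l : List Int) : ∀ (c : Nat),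
    (l.foldl (fun n v => Nat.gcd n v.toNat) c) ∣ c ∧
    ∀ v ∈ l, (l.foldl (fun n v => Nat.gcd n v.toNat) c) ∣ v.toNat := by
  induction l with
  | nil => intro c; exact ⟨dvd_rfl, by simp⟩
  | cons v l ih =>
    intro c
    obtain ⟨h1, h2⟩ := ih (Nat.gcd c v.toNat)
    refine ⟨h1.trans (Nat.gcd_dvd_left _ _), ?_⟩
    intro w hw
    rcases List.mem_cons.mp hw with rfl | hw
    · exact h1.trans (Nat.gcd_dvd_right _ _)
    · exact h2 w hw

theorem dvd_foldl_gcd (l : List Int) : ∀ (c d : Nat), d ∣ c → (∀ v ∈ l, d ∣ v.toNat) →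
    d ∣ l.foldl (fun n v => Nat.gcd n v.toNat) c := by
  induction l with
  | nil => intro c d hc _; exact hc
  | cons v l ih =>
    intro c d hc hl
    exact ih _ _ (Nat.dvd_gcd hc (hl v (by simp))) (fun w hw => hl w (by simp [hw]))

-- dict-fold facts (B's counting step; A's step is pointwise equal)
theorem get?_mem_values {d : PySem.Dict Int Int} {k v : Int} (h : d.get? k = some v) : v ∈ d.values :=
  List.mem_map.mpr ⟨(k, v), PySem.Dict.mem_items_of_get?_eq_some d h, rfl⟩

theorem getD_nonneg_of_values_pos (d : PySem.Dict Int Int) (h : ∀ v ∈ d.values, 1 ≤ v) (x : Int) :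
    0 ≤ d.getD x 0 := by
  rcases hx : d.get? x with _ | v
  · simp [PySem.Dict.getD_eq_get?_getD, hx]
  · have := h v (get?_mem_values hx)
    simp [PySem.Dict.getD_eq_get?_getD, hx]
    omega

theorem fold_values_pos (l : List Int) : ∀ (d : PySem.Dict Int Int), (∀ v ∈ d.values, 1 ≤ v) →
    ∀ v ∈ (l.foldl (fun d x => d.insert x (d.getD x 0 + 1)) d).values, 1 ≤ v := by
  induction l with
  | nil => intro d hd; exact hd
  | cons x l ih =>
    intro d hd
    refine ih _ ?_
    intro v hv
    rcases PySem.Dict.mem_values_insert d x _ v hv with rfl | hv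
    · have := getD_nonneg_of_values_pos d hd x; omega
    · exact hd v hv

theorem fold_items_ne_nil (l : List Int) : ∀ (d : PySem.Dict Int Int), d.items ≠ [] →
    (l.foldl (fun d x => d.insert x (d.getD x 0 + 1)) d).items ≠ [] := by
  induction l with
  | nil => intro d hd; exact hd
  | cons x l ih =>
    intro d hd
    exact ih _ (List.ne_nil_of_mem (PySem.Dict.mem_items_insert_self d x _))

-- ===== VERDICT (by name: the statement is the Claim_ definition above) =====
theorem hasGroupsSizeX_spec : Claim_equal_hasGroupsSizeX := by
  intro deck _ hpre
  unfold Spec_hasGroupsSizeX hasGroupsSizeX hasGroupsSizeX_alt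
  -- A's counting step equals B's
  have hstep : (fun (d : PySem.Dict Int Int) x => d.insert x (1 + d.getD x 0))
      = (fun (d : PySem.Dict Int Int) x => d.insert x (d.getD x 0 + 1)) := by
    funext d x; rw [Int.add_comm]
  simp only [hstep]
  set D := deck.foldl (fun (d : PySem.Dict Int Int) x => d.insert x (d.getD x 0 + 1)) PySem.Dict.empty with hD
  -- A's appended-value list is D.values
  have hval : D.items.foldl (fun acc item => acc ++ [item.2]) [] = D.values := by
    rw [PySem.List.foldl_append_singleton_eq_map]; rfl
  rw [hval]
  -- values are nonempty and positive
  have hpos : ∀ v ∈ D.values, 1 ≤ v := by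
    refine fold_values_pos deck PySem.Dict.empty ?_
    simp [PySem.Dict.values, PySem.Dict.empty]
  have hne : D.values ≠ [] := by
    obtain ⟨x, l, rfl⟩ := List.exists_cons_of_ne_nil hpre
    have : D.items ≠ [] := by
      rw [hD]
      simp only [List.foldl_cons]
      exact fold_items_ne_nil l _ (List.ne_nil_of_mem (PySem.Dict.mem_items_insert_self _ x _))
    intro h
    rw [show D.values = D.items.map (fun p => p.2) from rfl] at h
    exact this (List.map_eq_nil_iff.mp h)
  obtain ⟨v0, rest, hvals⟩ := List.exists_cons_of_ne_nil hne
  rw [hvals]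
  -- B's min exists
  rcases hmin : PySem.List.min? (v0 :: rest) (fun v => v) with _ | m
  · exact absurd (PySem.List.min?_eq_none_iff _ _ |>.mp hmin) (by simp)
  have hmmem : m ∈ v0 :: rest := PySem.List.min?_mem hmin
  have hmle : ∀ y ∈ v0 :: rest, m ≤ y := PySem.List.min?_isMin hmin
  have hpos' : ∀ v ∈ v0 :: rest, 1 ≤ v := by rw [← hvals]; exact hpos
  -- A's index loop is a fold over the tail
  rw [PySem.List.pyGetD_zero_cons]
  rw [PySem.List.foldl_pyRange_pyGetD' (v0 :: rest) 0 (fun cur v => pyGcdA (max cur v) (min cur v)) v0 (by norm_num)]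
  have hdrop : List.drop (1 : Int).toNat (v0 :: rest) = rest := by rfl
  rw [hdrop]
  -- reduce A to the Nat gcd fold
  have hv0n : 0 ≤ v0 := by have := hpos' v0 (by simp); omega
  have hfold : List.foldl (fun cur v => pyGcdA (max cur v) (min cur v)) v0 rest
      = ((rest.foldl (fun n v => Nat.gcd n v.toNat) v0.toNat : Nat) : Int) := by
    conv_lhs => rw [show v0 = ((v0.toNat : Nat) : Int) from (Int.toNat_of_nonneg hv0n).symm]
    exact fold_gcd_eq rest v0.toNat (fun v hv => by have := hpos' v (by simp [hv]); omega)
  rw [hfold]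
  obtain ⟨hGd0, hGdm⟩ := foldl_gcd_dvd rest v0.toNat
  set G := rest.foldl (fun n v => Nat.gcd n v.toNat) v0.toNat with hG
  -- G divides every count and is positive
  have hGdvd : ∀ v ∈ v0 :: rest, (G : Int) ∣ v := by
    intro v hv
    have h1 : 1 ≤ v := hpos' v hv
    have hd : G ∣ v.toNat := by
      rcases List.mem_cons.mp hv with rfl | hv
      · exact hGd0
      · exact hGdm v hv
    have h2 : (G : Int) ∣ ((v.toNat : Nat) : Int) := Int.natCast_dvd_natCast.mpr hd
    rwa [Int.toNat_of_nonneg (by omega)] at h2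
  have hGpos : 1 ≤ G := by
    have h1 : 1 ≤ v0 := hpos' v0 (by simp)
    rcases Nat.eq_zero_or_pos G with h | h
    · have h0 : v0.toNat = 0 := Nat.eq_zero_of_zero_dvd (h ▸ hGd0)
      omega
    · exact h
  -- compare the two booleans
  rw [Bool.eq_iff_iff]
  simp only [decide_eq_true_eq, List.any_eq_true, List.all_eq_true, PySem.List.mem_pyRange_one,
    beq_iff_eq]
  constructor
  · intro h2G
    have h2G' : 2 ≤ G := by exact_mod_cast h2G
    refine ⟨(G : Int), ⟨by exact_mod_cast h2G', ?_⟩, ?_⟩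
    · have hm1 : 1 ≤ m := hpos' m hmmem
      have hdm : (G : Int) ∣ m := hGdvd m hmmem
      have hdm' : G ∣ m.toNat := by
        rw [show m = ((m.toNat : Nat) : Int) from (Int.toNat_of_nonneg (by omega)).symm] at hdm
        exact_mod_cast hdm
      have hle : G ≤ m.toNat := Nat.le_of_dvd (by omega) hdm'
      omega
    · intro v hv
      exact (PySem.Int.mod_eq_zero_iff_dvd v (G : Int)).mpr (hGdvd v hv)
  · rintro ⟨g, ⟨hg2, _⟩, hgall⟩
    have hgd : ∀ v ∈ v0 :: rest, g.toNat ∣ v.toNat := by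
      intro v hv
      have hdvd : g ∣ v := (PySem.Int.mod_eq_zero_iff_dvd v g).mp (hgall v hv)
      have h1 : 1 ≤ v := hpos' v hv
      have h2 : ((g.toNat : Nat) : Int) ∣ ((v.toNat : Nat) : Int) := by
        rwa [Int.toNat_of_nonneg (by omega), Int.toNat_of_nonneg (by omega)]
      exact Int.natCast_dvd_natCast.mp h2
    have hdG : g.toNat ∣ G :=
      dvd_foldl_gcd rest v0.toNat g.toNat (hgd v0 (by simp)) (fun v hv => hgd v (by simp [hv]))
    have hle : g.toNat ≤ G := Nat.le_of_dvd (by omega) hdG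
    have : 2 ≤ G := by omega
    exact_mod_cast this
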